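-- pv_equiv track=rewrite | github.com/mktran0417/CodeSignal | cyclicshift.py | solution
-- ===== SOURCE A (Python) =====
-- def solution(elements):
--     sorted_elements = elements.copy()
--     sorted_elements.sort()
--
--     possible_solutions = {}
--
--     if sorted_elements == elements:
--         return 0
--
--     for i in range(len(elements)):
--         elements.append(elements.pop(0))
--         possible_solutions[tuple(elements)] = i + 1
--
--     if possible_solutions.__contains__(tuple(sorted_elements)):
--         return possible_solutions.get(tuple(sorted_elements))
--
--     return -1
-- ===== SOURCE B (Python) =====
-- def solution(elements):
--     s = sorted(elements)
--     if s == elements: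
--         return 0
--     n = len(elements)
--     doubled = elements + elements
--     for k in range(n, 0, -1):
--         if doubled[k:k + n] == s:
--             return k
--     return -1
-- ===== Notes on version B (the rewrite author's own statement) =====
-- stated objective: alternative
-- what changed: Instead of mutating the list through n pop/append rotations and hashing every rotation into a dict of tuples, B matches the sorted list against windows of the doubled array, scanning offsets from n down to 1 so the first hit is the largest shift A's dict overwriting would keep.
import Mathlib
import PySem

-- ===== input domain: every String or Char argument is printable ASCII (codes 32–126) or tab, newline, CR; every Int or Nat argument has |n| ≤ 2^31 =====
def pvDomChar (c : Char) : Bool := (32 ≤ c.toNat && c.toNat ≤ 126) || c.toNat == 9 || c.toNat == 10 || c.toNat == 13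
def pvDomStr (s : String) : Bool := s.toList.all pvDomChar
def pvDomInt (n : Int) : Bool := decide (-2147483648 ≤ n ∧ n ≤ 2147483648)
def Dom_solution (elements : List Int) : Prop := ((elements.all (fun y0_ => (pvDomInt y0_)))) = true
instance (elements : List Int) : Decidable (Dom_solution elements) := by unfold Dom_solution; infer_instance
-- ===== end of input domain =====

-- B replaces A's n mutating pop/append rotations hashed into a dict of tuples by matching the
-- sorted list against windows of the doubled list, from offset n down to 1 (first hit = largest shift).
-- A mutates its argument but restores it by the end of the loop; the claim is about the return value.

-- ===== PORT A =====
-- one loop iteration: elements.append(elements.pop(0)); possible_solutions[tuple(elements)] = i + 1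
-- (pop(0) on [] would raise in Python; the loop body never runs on [], so the `none` branch is unreachable)
def stepA (st : List Int × PySem.Dict (List Int) Int) (i : Int) :
    List Int × PySem.Dict (List Int) Int :=
  match PySem.List.pop? st.1 0 with
  | some (v, rest) =>
      let e := rest ++ [v]
      (e, st.2.insert e (i + 1))
  | none => st

def solution (elements : List Int) : Int :=
  let sorted_elements := PySem.List.sorted elements id
  if sorted_elements == elements then 0
  else
    let st := (PySem.List.pyRange 0 (elements.length : Int) 1).foldl stepA
                (elements, PySem.Dict.empty)
    if st.2.contains sorted_elements then (st.2.get? sorted_elements).getD (-1)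
    else -1

-- ===== PORT B =====
-- the countdown loop `for k in range(n, 0, -1): if doubled[k:k+n] == s: return k` / `return -1`
def altGo (doubled s : List Int) (n : Nat) : Nat → Int
  | 0 => -1
  | k + 1 =>
      if PySem.List.slice doubled (some ((k + 1 : Nat) : Int))
           (some (((k + 1 : Nat) : Int) + (n : Int))) == s then ((k + 1 : Nat) : Int)
      else altGo doubled s n k

def solution_alt (elements : List Int) : Int :=
  let s := PySem.List.sorted elements id
  if s == elements then 0
  else
    let n := elements.length
    let doubled := elements ++ elements
    altGo doubled s n n

-- ===== PRECONDITION & SPEC =====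
def Spec_solution (elements : List Int) (out : Int) : Prop := out = solution_alt elements
instance (elements : List Int) (out : Int) : Decidable (Spec_solution elements out) := by unfold Spec_solution; infer_instance

-- ===== CLAIM (what is proved, stated in full; the proofs are below) =====
def Claim_equal_solution : Prop := ∀ (elements : List Int), Dom_solution elements → Spec_solution elements (solution elements)

-- ===== LEMMAS AND PROOFS =====

-- the best (largest) shift k ≤ m whose left rotation of xs equals s, as an Option
def bestShift (xs s : List Int) : Nat → Option Int
  | 0 => none
  | k + 1 =>
      if xs.drop (k + 1) ++ xs.take (k + 1) = s then some ((k + 1 : Nat) : Int)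
      else bestShift xs s k

-- window k of the doubled list is the left rotation by k (for k ≤ length)
theorem rot_doubled (xs : List Int) (k : Nat) (hk : k ≤ xs.length) :
    ((xs ++ xs).drop k).take xs.length = xs.drop k ++ xs.take k := by
  rw [List.drop_append_of_le_length hk, List.take_append]
  rw [List.take_of_length_le (by simp), List.length_drop]
  have h2 : xs.length - (xs.length - k) = k := by omega
  rw [h2]

theorem altGo_eq_bestShift (xs s : List Int) (m : Nat) (hm : m ≤ xs.length) :
    altGo (xs ++ xs) s xs.length m = (bestShift xs s m).getD (-1) := by
  induction m with
  | zero => simp [altGo, bestShift]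
  | succ k ih =>
      rw [altGo, bestShift, PySem.List.slice_natCast_add, rot_doubled xs (k + 1) hm]
      by_cases h : xs.drop (k + 1) ++ xs.take (k + 1) = s
      · simp [h]
      · simp only [h, if_false, beq_iff_eq]
        exact ih (by omega)

-- A's loop invariant: after m iterations the list is the rotation by m and the dict's
-- lookup at s is the largest shift ≤ m whose rotation equals s
theorem loopA_inv (xs s : List Int) (m : Nat) (hm : m ≤ xs.length) :
    ((PySem.List.pyRange 0 (m : Int) 1).foldl stepA (xs, PySem.Dict.empty)).1
        = xs.drop m ++ xs.take m ∧
    ((PySem.List.pyRange 0 (m : Int) 1).foldl stepA (xs, PySem.Dict.empty)).2.get? s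
        = bestShift xs s m := by
  induction m with
  | zero =>
      simp [bestShift]
  | succ k ih =>
      obtain ⟨h1, h2⟩ := ih (by omega)
      have hk : k < xs.length := by omega
      have hsplit : PySem.List.pyRange 0 ((k + 1 : Nat) : Int) 1
          = PySem.List.pyRange 0 (k : Nat) 1 ++ [(k : Int)] := by
        have hc : ((k + 1 : Nat) : Int) = (k : Nat) + 1 := by push_cast; ring
        rw [hc]
        exact PySem.List.pyRange_one_succ_right (by exact_mod_cast Nat.zero_le k)
      rw [hsplit, List.foldl_append, List.foldl_cons, List.foldl_nil]
      set st := (PySem.List.pyRange 0 (k : Nat) 1).foldl stepA (xs, PySem.Dict.empty) with hst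
      have hdrop : xs.drop k = xs[k] :: xs.drop (k + 1) :=
        (List.drop_eq_getElem_cons hk)
      have hrot1 : st.1 = xs[k] :: (xs.drop (k + 1) ++ xs.take k) := by
        rw [h1, hdrop, List.cons_append]
      have hpop : PySem.List.pop? st.1 0
          = some (xs[k], xs.drop (k + 1) ++ xs.take k) := by
        rw [hrot1]; exact PySem.List.pop?_zero_cons ..
      have htake : xs.take (k + 1) = xs.take k ++ [xs[k]] := by
        rw [List.take_add_one]; simp [List.getElem?_eq_getElem hk]
      have hnew : (xs.drop (k + 1) ++ xs.take k) ++ [xs[k]]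
          = xs.drop (k + 1) ++ xs.take (k + 1) := by
        rw [htake, List.append_assoc]
      constructor
      · show (stepA st (k : Int)).1 = _
        rw [stepA, hpop]; simp only []; exact hnew
      · show (stepA st (k : Int)).2.get? s = _
        rw [stepA, hpop]
        simp only
        rw [PySem.Dict.get?_insert, hnew, h2, bestShift]
        by_cases h : xs.drop (k + 1) ++ xs.take (k + 1) = s
        · rw [if_pos h.symm, if_pos h]; norm_num
        · rw [if_neg (fun hh => h hh.symm), if_neg h]

-- ===== VERDICT (by name: the statement is the Claim_ definition above) =====
theorem solution_spec : Claim_equal_solution := by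
  intro elements _
  show solution elements = solution_alt elements
  unfold solution solution_alt
  by_cases hs : PySem.List.sorted elements id = elements
  · simp [hs]
  · simp only [beq_iff_eq, hs, if_false]
    obtain ⟨-, h2⟩ := loopA_inv elements (PySem.List.sorted elements id)
      elements.length (le_refl _)
    rw [altGo_eq_bestShift _ _ _ (le_refl _)]
    rw [PySem.Dict.contains_eq_isSome_get?, h2]
    cases bestShift elements (PySem.List.sorted elements id) elements.length with
    | none => simp
    | some v => simp
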